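-- pv_equiv track=rewrite | github.com/guswns3371/Algorithm | src/Programmers/old/랜덤문제/전력망을 둘로 나누기.py | get_tree
-- ===== SOURCE A (Python) =====
-- def find(parent, x):
--     if parent[x] != x:
--         parent[x] = find(parent, parent[x])
--     return parent[x]
--
-- def union(parent, a, b):
--     pa = find(parent, a)
--     pb = find(parent, b)
--     if pa > pb:
--         parent[pa] = pb
--     else:
--         parent[pb] = pa
--
-- def get_tree(n, wires, check):
--     parent = [i for i in range(n + 1)]
--     for i in range(len(wires)):
--         if i != check:
--             v1, v2 = wires[i]
--             if find(parent, v1) != find(parent, v2):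
--                 union(parent, v1, v2)
--
--     return parent
-- ===== SOURCE B (Python) =====
-- def _root(parent, x):
--     # collect the path to the root, then point every node on it at the root
--     path = []
--     while parent[x] != x:
--         path.append(x)
--         x = parent[x]
--     for v in path:
--         parent[v] = x
--     return x
--
-- def get_tree(n, wires, check):
--     parent = list(range(n + 1))
--     for i, wire in enumerate(wires):
--         if i == check:
--             continue
--         a, b = wire
--         ra = _root(parent, a)
--         rb = _root(parent, b)
--         if ra != rb:
--             parent[max(ra, rb)] = min(ra, rb)
--     return parent
-- ===== Notes on version B (the rewrite author's own statement) =====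
-- stated objective: idiomatic
-- what changed: B drops the separate union helper and its redundant re-finds entirely: each step finds both roots once with an iterative path-collecting find (gather the chain into a list, then point every listed node at the root) and, if the roots differ, writes parent[max(ra,rb)]=min(ra,rb) directly; A instead recurses with compression on the unwind and calls union, which re-runs find twice on the already-compressed array.
import Mathlib
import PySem

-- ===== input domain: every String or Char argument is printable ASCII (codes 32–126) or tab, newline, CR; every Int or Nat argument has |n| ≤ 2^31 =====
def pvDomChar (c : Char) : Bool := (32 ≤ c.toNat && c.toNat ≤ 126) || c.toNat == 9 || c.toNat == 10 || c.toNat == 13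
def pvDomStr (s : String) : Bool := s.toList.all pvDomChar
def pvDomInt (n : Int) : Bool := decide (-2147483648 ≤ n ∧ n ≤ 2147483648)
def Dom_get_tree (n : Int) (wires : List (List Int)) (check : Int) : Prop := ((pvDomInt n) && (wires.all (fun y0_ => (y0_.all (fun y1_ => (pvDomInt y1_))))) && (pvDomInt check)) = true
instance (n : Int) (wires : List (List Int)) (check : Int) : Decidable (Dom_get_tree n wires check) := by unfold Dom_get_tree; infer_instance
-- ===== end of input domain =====

-- B replaces A's recursive find + separate union (with its redundant re-finds) by a single
-- path-collecting iterative find per endpoint and a direct parent[max]=min write; the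
-- returned parent array is identical (neither program mutates its arguments).

-- ===== PORT A =====
-- find(parent, x): recursion with path compression on the unwind.  The recursion is ported
-- with a fuel parameter (length + 2 at each call site, always sufficient when the chain is
-- acyclic); fuel exhaustion / IndexError = none.  'return parent[x]' after 'parent[x] = r'
-- returns exactly r, so the port returns r directly; the write parent[x] = r is pySetD (its
-- index was just read successfully, so it is in range and Python cannot raise there).
def pvFindA : Nat → List Int → Int → Option (Int × List Int)
  | 0, _, _ => none
  | fuel+1, parent, x =>
    match PySem.List.pyGet? parent x with
    | none => none
    | some px =>
      if px = x then some (px, parent)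
      else
        match pvFindA fuel parent px with
        | none => none
        | some (r, p) => some (r, PySem.List.pySetD p x r)

-- union(parent, a, b): two finds, then attach the larger root under the smaller.
-- The writes are at root indices (just returned by a successful find), hence in range.
def pvUnionA (parent : List Int) (a b : Int) : Option (List Int) :=
  match pvFindA (parent.length + 2) parent a with
  | none => none
  | some (pa, p1) =>
    match pvFindA (p1.length + 2) p1 b with
    | none => none
    | some (pb, p2) =>
      some (if pa > pb then PySem.List.pySetD p2 pa pb else PySem.List.pySetD p2 pb pa)

-- one iteration of A's 'for i in range(len(wires))' loop (ValueError on unpacking a wire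
-- whose length is not 2 = none)
def pvStepA (check : Int) (wires : List (List Int)) (st : Option (List Int)) (i : Int) :
    Option (List Int) :=
  match st with
  | none => none
  | some parent =>
    if i ≠ check then
      match PySem.List.pyGet? wires i with
      | some [v1, v2] =>
        match pvFindA (parent.length + 2) parent v1 with
        | none => none
        | some (r1, p1) =>
          match pvFindA (p1.length + 2) p1 v2 with
          | none => none
          | some (r2, p2) => if r1 ≠ r2 then pvUnionA p2 v1 v2 else some p2
      | _ => none
    else some parent

def get_tree (n : Int) (wires : List (List Int)) (check : Int) : List Int :=
  match (PySem.List.pyRange 0 ((wires.length : Int)) 1).foldl (pvStepA check wires)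
      (some (PySem.List.pyRange 0 (n + 1) 1)) with
  | some p => p
  | none => []

-- ===== PORT B =====
-- _root's while loop: follow parent pointers to the root, appending each visited
-- non-root node to path ('path.append(x); x = parent[x]'); same fuel convention as A
def pvRootB : Nat → List Int → Int → List Int → Option (List Int × Int)
  | 0, _, _, _ => none
  | fuel+1, parent, x, path =>
    match PySem.List.pyGet? parent x with
    | none => none
    | some px =>
      if px = x then some (path, x)
      else pvRootB fuel parent px (path ++ [x])

-- _root's for loop: 'for v in path: parent[v] = r' (each index was read by the while
-- loop, hence in range)
def pvCompressB (parent : List Int) (path : List Int) (r : Int) : List Int :=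
  path.foldl (fun q v => PySem.List.pySetD q v r) parent

-- one iteration of B's 'for i, wire in enumerate(wires)' loop: find both roots once,
-- compress, then a single write parent[max(ra, rb)] = min(ra, rb) if the roots differ
def pvStepB (check : Int) (st : Option (List Int)) (iw : Int × List Int) :
    Option (List Int) :=
  match st with
  | none => none
  | some parent =>
    if iw.1 = check then some parent
    else
      match iw.2 with
      | [a, b] =>
        match pvRootB (parent.length + 2) parent a [] with
        | none => none
        | some (pa, ra) =>
          let p1 := pvCompressB parent pa ra
          match pvRootB (p1.length + 2) p1 b [] with
          | none => none
          | some (pb, rb) =>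
            let p2 := pvCompressB p1 pb rb
            if ra ≠ rb then some (PySem.List.pySetD p2 (max ra rb) (min ra rb))
            else some p2
      | _ => none

def get_tree_alt (n : Int) (wires : List (List Int)) (check : Int) : List Int :=
  match (PySem.List.enumerate wires).foldl (pvStepB check)
      (some (PySem.List.pyRange 0 (n + 1) 1)) with
  | some p => p
  | none => []

-- ===== PRECONDITION & SPEC =====
-- Exactly the inputs on which Python A returns: every wire the loop actually unpacks
-- (index ≠ check) must have exactly two endpoints, each a valid (possibly negative) Python
-- index into parent (length n+1); otherwise A raises ValueError or IndexError.
def Pre_get_tree (n : Int) (wires : List (List Int)) (check : Int) : Prop :=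
  ∀ p ∈ PySem.List.enumerate wires, p.1 ≠ check →
    p.2.length = 2 ∧ ∀ v ∈ p.2, -(n + 1) ≤ v ∧ v ≤ n
instance (n : Int) (wires : List (List Int)) (check : Int) : Decidable (Pre_get_tree n wires check) := by unfold Pre_get_tree; infer_instance

def pvWitness_get_tree : Int × List (List Int) × Int := (2, [[0, 1], [1, 2]], 1)

def Spec_get_tree (n : Int) (wires : List (List Int)) (check : Int) (out : List Int) : Prop := out = get_tree_alt n wires check
instance (n : Int) (wires : List (List Int)) (check : Int) (out : List Int) : Decidable (Spec_get_tree n wires check out) := by unfold Spec_get_tree; infer_instance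

-- ===== CLAIM (what is proved, stated in full; the proofs are below) =====
def Claim_equal_get_tree : Prop := ∀ (n : Int) (wires : List (List Int)) (check : Int), Dom_get_tree n wires check → Pre_get_tree n wires check → Spec_get_tree n wires check (get_tree n wires check)

-- ===== LEMMAS AND PROOFS =====

-- the chain of nodes followed from x to the root: some (ns, r) where ns are the visited
-- non-root nodes in order (starting with x) and r is the root
def pvChain : Nat → List Int → Int → Option (List Int × Int)
  | 0, _, _ => none
  | f+1, parent, x =>
    match PySem.List.pyGet? parent x with
    | none => none
    | some px =>
      if px = x then some ([], x)
      else
        match pvChain f parent px with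
        | none => none
        | some (ns, r) => some (x :: ns, r)

-- set every node of ns to point at r (innermost-first, matching A's unwind order)
def pvWriteAll (p : List Int) (ns : List Int) (r : Int) : List Int :=
  ns.foldr (fun a q => PySem.List.pySetD q a r) p

theorem pv_len_writeAll (p : List Int) (ns : List Int) (r : Int) :
    (pvWriteAll p ns r).length = p.length := by
  induction ns with
  | nil => rfl
  | cons a ns ih => simp [pvWriteAll, PySem.List.length_pySetD] at *; exact ih

theorem pv_get_congr_idx {p : List Int} {a b : Int}
    (h : PySem.List.pyIdx? p.length a = PySem.List.pyIdx? p.length b) :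
    PySem.List.pyGet? p a = PySem.List.pyGet? p b := by
  simp [PySem.List.pyGet?, h]

theorem pv_get_setD_ne {p : List Int} {a x : Int} (v : Int)
    (h : PySem.List.pyIdx? p.length a ≠ PySem.List.pyIdx? p.length x) :
    PySem.List.pyGet? (PySem.List.pySetD p x v) a = PySem.List.pyGet? p a := by
  simp only [PySem.List.pySetD, PySem.List.pySet?]
  cases hix : PySem.List.pyIdx? p.length x with
  | none => simp
  | some k =>
    rw [hix] at h
    simp only [Option.map_some, Option.getD_some, PySem.List.pyGet?, List.length_set]
    cases hia : PySem.List.pyIdx? p.length a with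
    | none => simp
    | some j =>
      rw [hia] at h
      have hjk : j ≠ k := by intro hh; exact h (by rw [hh])
      simp only [Option.bind_some]
      exact List.getElem?_set_ne (by omega : k ≠ j)

-- writes of the SAME value commute unconditionally (even at the same cell)
theorem pv_setD_same_comm (p : List Int) (a b v : Int) :
    PySem.List.pySetD (PySem.List.pySetD p a v) b v
      = PySem.List.pySetD (PySem.List.pySetD p b v) a v := by
  simp only [PySem.List.pySetD, PySem.List.pySet?]
  cases hia : PySem.List.pyIdx? p.length a with
  | none =>
    cases hib : PySem.List.pyIdx? p.length b with
    | none => simp [hia, hib]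
    | some k => simp [hia, hib, List.length_set]
  | some j =>
    cases hib : PySem.List.pyIdx? p.length b with
    | none => simp [hia, hib, List.length_set]
    | some k =>
      by_cases hjk : j = k
      · subst hjk; simp [hia, hib, List.length_set]
      · have := List.set_comm (l := p) v v (by omega : j ≠ k)
        simp [hia, hib, List.length_set, this]

theorem pv_setD_noop {p : List Int} {x v : Int} (h : PySem.List.pyGet? p x = some v) :
    PySem.List.pySetD p x v = p := by
  simp only [PySem.List.pyGet?] at h
  cases hix : PySem.List.pyIdx? p.length x with
  | none => simp [PySem.List.pySetD, PySem.List.pySet?, hix]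
  | some k =>
    rw [hix] at h
    simp only [Option.bind_some] at h
    have hk : k < p.length := (List.getElem?_eq_some_iff.mp h).1
    have hval : p[k] = v := by
      have := (List.getElem?_eq_some_iff.mp h).2
      exact this
    have : p.set k v = p := by
      apply List.ext_getElem (by simp)
      intro j hj hj'
      by_cases hjk : j = k
      · subst hjk; simpa using hval.symm
      · rw [List.getElem_set_ne (by omega : k ≠ j)]
    simp [PySem.List.pySetD, PySem.List.pySet?, hix, this]

-- determinism of the chain in the fuel
theorem pv_chain_det : ∀ (f g : Nat) (p : List Int) (x : Int) (o₁ o₂ : List Int × Int),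
    pvChain f p x = some o₁ → pvChain g p x = some o₂ → o₁ = o₂ := by
  intro f
  induction f with
  | zero => intro g p x o₁ o₂ h1 h2; simp [pvChain] at h1
  | succ f ih =>
    intro g p x o₁ o₂ h1 h2
    cases g with
    | zero => simp [pvChain] at h2
    | succ g =>
      simp only [pvChain] at h1 h2
      split at h1
      · simp at h1
      · rename_i px hg
        split at h2
        · rename_i hg2; rw [hg] at hg2; simp at hg2
        · rename_i px2 hg2
          rw [hg] at hg2
          injection hg2 with hpx2
          subst hpx2
          by_cases hpx : px = x
          · rw [if_pos hpx] at h1 h2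
            injection h1 with h1
            injection h2 with h2
            rw [← h1, ← h2]
          · rw [if_neg hpx] at h1 h2
            split at h1
            · simp at h1
            · rename_i ns1 r1 hc1
              split at h2
              · simp at h2
              · rename_i ns2 r2 hc2
                have heq := ih g p px (ns1, r1) (ns2, r2) hc1 hc2
                injection h1 with h1
                injection h2 with h2
                rw [← h1, ← h2]
                simp only [Prod.mk.injEq] at heq ⊢
                exact ⟨by rw [heq.1], heq.2⟩

-- the root is a fixpoint
theorem pv_chain_root_fix : ∀ (f : Nat) (p : List Int) (x : Int) (ns : List Int) (r : Int),
    pvChain f p x = some (ns, r) → PySem.List.pyGet? p r = some r := by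
  intro f
  induction f with
  | zero => intro p x ns r h; simp [pvChain] at h
  | succ f ih =>
    intro p x ns r h
    simp only [pvChain] at h
    split at h
    · simp at h
    · rename_i px hg
      split at h
      · rename_i hpx
        injection h with h
        have hr : x = r := congrArg Prod.snd h
        rw [← hr, hg, hpx, hr]
      · rename_i hpx
        split at h
        · simp at h
        · rename_i ns' r' hc
          injection h with h
          have hr : r' = r := congrArg Prod.snd h
          exact hr ▸ ih p px ns' r' hc

-- every node of a chain starts the corresponding suffix chain
theorem pv_chain_suffix : ∀ (f : Nat) (p : List Int) (y : Int) (ns : List Int) (r : Int),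
    pvChain f p y = some (ns, r) → ∀ a ∈ ns,
      ∃ f' l₁ l₂, f' ≤ f ∧ ns = l₁ ++ a :: l₂ ∧ pvChain f' p a = some (a :: l₂, r) := by
  intro f
  induction f with
  | zero => intro p y ns r h; simp [pvChain] at h
  | succ f ih =>
    intro p y ns r h a ha
    have hstep := h
    simp only [pvChain] at h
    split at h
    · simp at h
    · rename_i py hg
      split at h
      · simp only [Option.some.injEq, Prod.mk.injEq] at h
        rw [← h.1] at ha
        simp at ha
      · rename_i hpy
        split at h
        · simp at h
        · rename_i ns' r' hc
          simp only [Option.some.injEq, Prod.mk.injEq] at h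
          obtain ⟨hns, hr⟩ := h
          rw [hr] at hc
          have ha2 : a ∈ y :: ns' := by rw [hns]; exact ha
          rcases List.mem_cons.mp ha2 with hay | ha'
          · subst hay
            rw [← hns] at hstep
            exact ⟨f + 1, [], ns', le_refl _, hns.symm, hstep⟩
          · obtain ⟨f', l₁, l₂, hf, heq, hch⟩ := ih p py ns' r hc a ha'
            exact ⟨f', y :: l₁, l₂, Nat.le_succ_of_le hf,
              by rw [← hns, heq]; rfl, hch⟩

-- A's find computes (root, chain nodes all rewritten to the root)
theorem pv_findA_eq_chain : ∀ (f : Nat) (p : List Int) (x : Int),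
    pvFindA f p x = (pvChain f p x).map (fun o => (o.2, pvWriteAll p o.1 o.2)) := by
  intro f
  induction f with
  | zero => intro p x; simp [pvFindA, pvChain]
  | succ f ih =>
    intro p x
    simp only [pvFindA, pvChain]
    cases hg : PySem.List.pyGet? p x with
    | none => simp
    | some px =>
      by_cases hpx : px = x
      · simp [hpx, pvWriteAll]
      · simp only [hpx, if_false, ih p px]
        cases hc : pvChain f p px with
        | none => simp
        | some o =>
          obtain ⟨ns, r⟩ := o
          simp [pvWriteAll]

-- B's while loop computes the same chain (accumulator in front)
theorem pv_rootB_eq_chain : ∀ (f : Nat) (p : List Int) (x : Int) (acc : List Int),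
    pvRootB f p x acc = (pvChain f p x).map (fun o => (acc ++ o.1, o.2)) := by
  intro f
  induction f with
  | zero => intro p x acc; simp [pvRootB, pvChain]
  | succ f ih =>
    intro p x acc
    simp only [pvRootB, pvChain]
    cases hg : PySem.List.pyGet? p x with
    | none => simp
    | some px =>
      by_cases hpx : px = x
      · simp [hpx]
      · simp only [hpx, if_false, ih p px (acc ++ [x])]
        cases hc : pvChain f p px with
        | none => simp
        | some o => obtain ⟨ns, r⟩ := o; simp

-- B's for loop writes the same cells the same value, so order does not matter
theorem pv_writeAll_setD_same (p : List Int) (ns : List Int) (x r : Int) :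
    pvWriteAll (PySem.List.pySetD p x r) ns r
      = PySem.List.pySetD (pvWriteAll p ns r) x r := by
  induction ns with
  | nil => rfl
  | cons a ns ih =>
    calc pvWriteAll (PySem.List.pySetD p x r) (a :: ns) r
        = PySem.List.pySetD (pvWriteAll (PySem.List.pySetD p x r) ns r) a r := rfl
      _ = PySem.List.pySetD (PySem.List.pySetD (pvWriteAll p ns r) x r) a r := by rw [ih]
      _ = PySem.List.pySetD (PySem.List.pySetD (pvWriteAll p ns r) a r) x r :=
          pv_setD_same_comm _ _ _ _
      _ = PySem.List.pySetD (pvWriteAll p (a :: ns) r) x r := rfl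

theorem pv_compressB_eq (p : List Int) (ns : List Int) (r : Int) :
    pvCompressB p ns r = pvWriteAll p ns r := by
  induction ns generalizing p with
  | nil => rfl
  | cons a ns ih =>
    calc pvCompressB p (a :: ns) r = pvCompressB (PySem.List.pySetD p a r) ns r := rfl
      _ = pvWriteAll (PySem.List.pySetD p a r) ns r := ih _
      _ = PySem.List.pySetD (pvWriteAll p ns r) a r := pv_writeAll_setD_same p ns a r
      _ = pvWriteAll p (a :: ns) r := rfl

theorem pv_idx_lt {n : Nat} {i : Int} {k : Nat}
    (h : PySem.List.pyIdx? n i = some k) : k < n := by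
  unfold PySem.List.pyIdx? at h
  split at h <;> split at h <;> simp_all <;> omega

-- reading a compressed array: any cell of ns (and any cell already holding r) reads r
theorem pv_get_writeAll : ∀ (ns : List Int) (p : List Int) (x r : Int),
    (∃ v, PySem.List.pyGet? p x = some v) →
    (x ∈ ns ∨ PySem.List.pyGet? p x = some r) →
    PySem.List.pyGet? (pvWriteAll p ns r) x = some r := by
  intro ns
  induction ns with
  | nil =>
    intro p x r _ h
    rcases h with h | h
    · simp at h
    · exact h
  | cons a ns ih =>
    intro p x r hv h
    obtain ⟨v, hvx⟩ := hv
    have hxk : ∃ k, PySem.List.pyIdx? p.length x = some k := by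
      simp only [PySem.List.pyGet?] at hvx
      cases hix : PySem.List.pyIdx? p.length x with
      | none => rw [hix] at hvx; simp at hvx
      | some k => exact ⟨k, rfl⟩
    obtain ⟨k, hk⟩ := hxk
    have hklt : k < p.length := pv_idx_lt hk
    have hlW : (pvWriteAll p ns r).length = p.length := pv_len_writeAll p ns r
    show PySem.List.pyGet? (PySem.List.pySetD (pvWriteAll p ns r) a r) x = some r
    by_cases hcell : PySem.List.pyIdx? p.length a = some k
    · have hsa : PySem.List.pySetD (pvWriteAll p ns r) a r = (pvWriteAll p ns r).set k r := by
        simp [PySem.List.pySetD, PySem.List.pySet?, hlW, hcell]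
      rw [hsa]
      simp only [PySem.List.pyGet?, List.length_set, hlW, hk, Option.bind_some]
      exact List.getElem?_set_self (by omega)
    · have hne : PySem.List.pyIdx? (pvWriteAll p ns r).length x
          ≠ PySem.List.pyIdx? (pvWriteAll p ns r).length a := by
        rw [hlW, hk]
        intro hh
        exact hcell hh.symm
      rw [pv_get_setD_ne r hne]
      apply ih p x r ⟨v, hvx⟩
      rcases h with h | h
      · rcases List.mem_cons.mp h with hxa | hxm
        · exact absurd (hxa ▸ hk) hcell
        · exact Or.inl hxm
      · exact Or.inr h

-- writes at cells disjoint from x's cell do not change what x reads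
theorem pv_get_writeAll_ne : ∀ (ns : List Int) (p : List Int) (x r : Int),
    (∀ a ∈ ns, PySem.List.pyIdx? p.length a ≠ PySem.List.pyIdx? p.length x) →
    PySem.List.pyGet? (pvWriteAll p ns r) x = PySem.List.pyGet? p x := by
  intro ns
  induction ns with
  | nil => intro p x r _; rfl
  | cons a ns ih =>
    intro p x r h
    have ha := h a List.mem_cons_self
    have hlW : (pvWriteAll p ns r).length = p.length := pv_len_writeAll p ns r
    show PySem.List.pyGet? (PySem.List.pySetD (pvWriteAll p ns r) a r) x = _
    rw [pv_get_setD_ne (p := pvWriteAll p ns r) (a := x) (x := a) r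
      (by rw [hlW]; exact fun hh => ha hh.symm)]
    exact ih p x r (fun b hb => h b (List.mem_cons_of_mem _ hb))

-- A's find is trivial on an array where parent[x] = r and parent[r] = r
theorem pv_findA_of_get (h : Nat) (q : List Int) (x r : Int)
    (hx : PySem.List.pyGet? q x = some r) (hr : PySem.List.pyGet? q r = some r) :
    pvFindA (h + 2) q x = some (r, q) := by
  show pvFindA (h + 1 + 1) q x = some (r, q)
  by_cases hrx : r = x
  · simp [pvFindA, hx, hrx]
  · simp [pvFindA, hx, hr, hrx, pv_setD_noop hx]

-- shape of a successful chain
theorem pv_chain_head : ∀ (f : Nat) (p : List Int) (x : Int) (ns : List Int) (r : Int),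
    pvChain f p x = some (ns, r) → (ns = [] ∧ x = r) ∨ (∃ t, ns = x :: t ∧ x ≠ r) := by
  intro f p x ns r h
  cases f with
  | zero => simp [pvChain] at h
  | succ f =>
    have hroot := pv_chain_root_fix _ _ _ _ _ h
    simp only [pvChain] at h
    split at h
    · simp at h
    · rename_i px hg
      split at h
      · rename_i hpx
        simp only [Option.some.injEq, Prod.mk.injEq] at h
        exact Or.inl ⟨h.1.symm, h.2⟩
      · rename_i hpx
        split at h
        · simp at h
        · rename_i ns' r' hc
          simp only [Option.some.injEq, Prod.mk.injEq] at h
          refine Or.inr ⟨ns', h.1.symm, ?_⟩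
          intro hxr
          rw [← hxr] at hroot
          rw [hg] at hroot
          exact hpx (Option.some.inj hroot)

-- after compression, both the start node and the root read the root
theorem pv_compressed_gets {f : Nat} {p : List Int} {x : Int} {ns : List Int} {r : Int}
    (h : pvChain f p x = some (ns, r)) :
    PySem.List.pyGet? (pvWriteAll p ns r) x = some r ∧
    PySem.List.pyGet? (pvWriteAll p ns r) r = some r := by
  have hr := pv_chain_root_fix f p x ns r h
  have hgr : PySem.List.pyGet? (pvWriteAll p ns r) r = some r :=
    pv_get_writeAll ns p r r ⟨r, hr⟩ (Or.inr hr)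
  refine ⟨?_, hgr⟩
  rcases pv_chain_head f p x ns r h with ⟨hns, hxr⟩ | ⟨t, hns, hxr⟩
  · subst hns; subst hxr; exact hgr
  · have hxv : ∃ v, PySem.List.pyGet? p x = some v := by
      cases f with
      | zero => simp [pvChain] at h
      | succ f =>
        simp only [pvChain] at h
        cases hg : PySem.List.pyGet? p x with
        | none => rw [hg] at h; simp at h
        | some px => exact ⟨px, rfl⟩
    exact pv_get_writeAll ns p x r hxv (Or.inl (hns ▸ List.mem_cons_self))

-- re-running A's find on the array its own find produced is a no-op
theorem pv_find_idem {f : Nat} {p : List Int} {x : Int} {ns : List Int} {r : Int}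
    (h : pvChain f p x = some (ns, r)) (g : Nat) :
    pvFindA (g + 2) (pvWriteAll p ns r) x = some (r, pvWriteAll p ns r) := by
  obtain ⟨hx, hr⟩ := pv_compressed_gets h
  exact pv_findA_of_get g _ x r hx hr

-- cells of a chain with root r2 are disjoint from any cell reading r1 ≠ r2 whose
-- value r1 is a fixpoint
theorem pv_chain_cells_ne {g : Nat} {p1 : List Int} {v : Int} {ns2 : List Int}
    {r2 y r1 : Int} (hc : pvChain g p1 v = some (ns2, r2))
    (hy : PySem.List.pyGet? p1 y = some r1) (hr1 : PySem.List.pyGet? p1 r1 = some r1)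
    (hne : r1 ≠ r2) :
    ∀ a ∈ r2 :: ns2, PySem.List.pyIdx? p1.length a ≠ PySem.List.pyIdx? p1.length y := by
  intro a ha heq
  have hga : PySem.List.pyGet? p1 a = some r1 := by rw [pv_get_congr_idx heq, hy]
  rcases List.mem_cons.mp ha with har | hans
  · have hfix := pv_chain_root_fix g p1 v ns2 r2 hc
    rw [← har] at hfix
    rw [hga] at hfix
    exact hne (har ▸ (Option.some.inj hfix))
  · obtain ⟨f', l₁, l₂, _, _, hch⟩ := pv_chain_suffix g p1 v ns2 r2 hc a hans
    by_cases har1 : r1 = a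
    · have hgaa : PySem.List.pyGet? p1 a = some a := by rw [hga, har1]
      have hc1 : pvChain 1 p1 a = some ([], a) := by simp [pvChain, hgaa]
      have := pv_chain_det f' 1 p1 a (a :: l₂, r2) ([], a) hch hc1
      simp at this
    · have hc2 : pvChain 2 p1 a = some ([a], r1) := by
        simp [pvChain, hga, hr1, har1]
      have hdet := pv_chain_det f' 2 p1 a (a :: l₂, r2) ([a], r1) hch hc2
      exact hne (congrArg Prod.snd hdet).symm

-- the crux: A's union on the doubly-compressed array performs exactly B's single write
theorem pv_unionA_eq {f g : Nat} {p : List Int} {v1 v2 : Int} {ns1 ns2 : List Int}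
    {r1 r2 : Int} (h1 : pvChain f p v1 = some (ns1, r1))
    (h2 : pvChain g (pvWriteAll p ns1 r1) v2 = some (ns2, r2)) (hne : r1 ≠ r2) :
    pvUnionA (pvWriteAll (pvWriteAll p ns1 r1) ns2 r2) v1 v2
      = some (PySem.List.pySetD (pvWriteAll (pvWriteAll p ns1 r1) ns2 r2)
          (max r1 r2) (min r1 r2)) := by
  obtain ⟨gv1, gr1⟩ := pv_compressed_gets h1
  have K1 := pv_chain_cells_ne h2 gv1 gr1 hne
  have K2 := pv_chain_cells_ne h2 gr1 gr1 hne
  have g2v1 : PySem.List.pyGet? (pvWriteAll (pvWriteAll p ns1 r1) ns2 r2) v1 = some r1 := by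
    rw [pv_get_writeAll_ne ns2 _ v1 r2 (fun a ha => K1 a (List.mem_cons_of_mem _ ha))]
    exact gv1
  have g2r1 : PySem.List.pyGet? (pvWriteAll (pvWriteAll p ns1 r1) ns2 r2) r1 = some r1 := by
    rw [pv_get_writeAll_ne ns2 _ r1 r2 (fun a ha => K2 a (List.mem_cons_of_mem _ ha))]
    exact gr1
  have F1 := pv_findA_of_get (pvWriteAll (pvWriteAll p ns1 r1) ns2 r2).length _ v1 r1 g2v1 g2r1
  have F2 := pv_find_idem h2 (pvWriteAll (pvWriteAll p ns1 r1) ns2 r2).length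
  unfold pvUnionA
  rw [F1]
  simp only [F2]
  by_cases hgt : r1 > r2
  · rw [if_pos hgt, max_eq_left (le_of_lt hgt), min_eq_right (le_of_lt hgt)]
  · have hlt : r1 < r2 := lt_of_le_of_ne (not_lt.mp hgt) hne
    rw [if_neg hgt, max_eq_right (le_of_lt hlt), min_eq_left (le_of_lt hlt)]

theorem pv_step_eq (check : Int) (wires : List (List Int)) (st : Option (List Int)) (i : Int)
    (h0 : 0 ≤ i) (h1 : i < (wires.length : Int)) :
    pvStepA check wires st i = pvStepB check st (i, PySem.List.pyGetD wires i []) := by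
  have hidx : PySem.List.pyIdx? wires.length i = some i.toNat := by
    simp [PySem.List.pyIdx?, h0, h1]
  have hlt : i.toNat < wires.length := by omega
  have hw : PySem.List.pyGet? wires i = some wires[i.toNat] := by
    simp [PySem.List.pyGet?, hidx, List.getElem?_eq_getElem hlt]
  have hd : PySem.List.pyGetD wires i [] = wires[i.toNat] := by
    simp [PySem.List.pyGetD, hw]
  cases st with
  | none => rfl
  | some parent =>
    simp only [pvStepA, pvStepB, hw, hd]
    by_cases hic : i = check
    · simp [hic]
    · rw [if_pos (show i ≠ check from hic), if_neg hic]
      rcases hws : wires[i.toNat] with _ | ⟨v1, _ | ⟨v2, _ | _⟩⟩ <;>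
        [skip; skip; skip; rfl] <;> try rfl
      simp only [pv_findA_eq_chain, pv_rootB_eq_chain, pv_compressB_eq]
      cases hc1 : pvChain (parent.length + 2) parent v1 with
      | none => rfl
      | some o1 =>
        obtain ⟨ns1, r1⟩ := o1
        simp only [Option.map_some, List.nil_append]
        cases hc2 : pvChain ((pvWriteAll parent ns1 r1).length + 2)
            (pvWriteAll parent ns1 r1) v2 with
        | none => rfl
        | some o2 =>
          obtain ⟨ns2, r2⟩ := o2
          simp only [Option.map_some]
          by_cases hrr : r1 = r2
          · simp [hrr]
          · simp only [ne_eq, hrr, not_false_eq_true, if_true]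
            rw [pv_unionA_eq hc1 hc2 hrr]

theorem pv_get_tree_eq (n : Int) (wires : List (List Int)) (check : Int) :
    get_tree n wires check = get_tree_alt n wires check := by
  unfold get_tree get_tree_alt
  rw [PySem.List.enumerate_eq_map_pyRange wires [], List.foldl_map]
  have hlen : PySem.List.len wires = (wires.length : Int) := by
    simp [PySem.List.len]
  rw [hlen]
  rw [PySem.List.foldl_congr_mem _ (pvStepA check wires)
    (fun st j => pvStepB check st (j, PySem.List.pyGetD wires j []))
    _ (fun st j hj => by
      have := (PySem.List.mem_pyRange_one).mp hj
      exact pv_step_eq check wires st j this.1 this.2)]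

-- ===== VERDICT (by name: the statement is the Claim_ definition above) =====
theorem get_tree_spec : Claim_equal_get_tree := by
  intro n wires check _ _
  unfold Spec_get_tree
  exact pv_get_tree_eq n wires check
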